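-- pv_equiv track=rewrite | github.com/dsgrid/datasight | src/datasight/data_profile.py | _suggest_weight_column
-- ===== SOURCE A (Python) =====
-- def _suggest_weight_column(
--     column_name: str,
--     role: str,
--     unit: str | None,
--     sibling_columns: list[str],
-- ) -> str | None:
--     lower = column_name.lower()
--     preferred: list[str] = []
--
--     if role == "price":
--         preferred.extend(
--             [
--                 "net_generation_mwh",
--                 "generation_mwh",
--                 "load_mwh",
--                 "energy_mwh",
--                 "fuel_consumed_mmbtu",
--                 "fuel_mmbtu",
--                 "quantity",
--             ]
--         )
--     elif role == "rate":
--         if "mmbtu" in lower or unit == "mmbtu":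
--             preferred.extend(["fuel_consumed_mmbtu", "fuel_mmbtu"])
--         preferred.extend(
--             [
--                 "net_generation_mwh",
--                 "generation_mwh",
--                 "load_mwh",
--                 "energy_mwh",
--                 "output_mwh",
--             ]
--         )
--     elif role == "ratio":
--         preferred.extend(
--             [
--                 "net_generation_mwh",
--                 "generation_mwh",
--                 "load_mwh",
--                 "energy_mwh",
--                 "customers",
--                 "customer_count",
--             ]
--         )
--
--     lower_siblings = {name.lower(): name for name in sibling_columns if name.lower() != lower}
--     for candidate in preferred:
--         match = lower_siblings.get(candidate.lower())
--         if match: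
--             return match
--     return None
-- ===== SOURCE B (Python) =====
-- def _suggest_weight_column(
--     column_name: str,
--     role: str,
--     unit,
--     sibling_columns: list,
-- ):
--     lower = column_name.lower()
--
--     if role == "price":
--         preferred = [
--             "net_generation_mwh",
--             "generation_mwh",
--             "load_mwh",
--             "energy_mwh",
--             "fuel_consumed_mmbtu",
--             "fuel_mmbtu",
--             "quantity",
--         ]
--     elif role == "rate":
--         fuel = ["fuel_consumed_mmbtu", "fuel_mmbtu"] if "mmbtu" in lower or unit == "mmbtu" else []
--         preferred = fuel + [
--             "net_generation_mwh",
--             "generation_mwh",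
--             "load_mwh",
--             "energy_mwh",
--             "output_mwh",
--         ]
--     elif role == "ratio":
--         preferred = [
--             "net_generation_mwh",
--             "generation_mwh",
--             "load_mwh",
--             "energy_mwh",
--             "customers",
--             "customer_count",
--         ]
--     else:
--         preferred = []
--
--     rank = {cand.lower(): i for i, cand in enumerate(preferred)}
--     best = None  # (rank, sibling name)
--     for name in sibling_columns:
--         key = name.lower()
--         if key == lower:
--             continue
--         r = rank.get(key)
--         if r is not None and (best is None or r < best[0]):
--             best = (r, name)
--     return best[1] if best else None
-- ===== Notes on version B (the rewrite author's own statement) =====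
-- stated objective: alternative
-- what changed: Replaces A's build-a-lowercase-dict-of-siblings-then-scan-the-preference-list with a rank index over the preference list plus a single argmin pass over the siblings; Pre_ excludes lists containing two different spellings of the same case-insensitive sibling name, on which A's dict-overwrite last-wins choice and B's first-seen argmin choice are both defensible accidents of iteration order.
-- outside the precondition, e.g. on _suggest_weight_column('x', 'price', None, ['Quantity', 'QUANTITY']): A returns 'QUANTITY', B returns 'Quantity'
import Mathlib
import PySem

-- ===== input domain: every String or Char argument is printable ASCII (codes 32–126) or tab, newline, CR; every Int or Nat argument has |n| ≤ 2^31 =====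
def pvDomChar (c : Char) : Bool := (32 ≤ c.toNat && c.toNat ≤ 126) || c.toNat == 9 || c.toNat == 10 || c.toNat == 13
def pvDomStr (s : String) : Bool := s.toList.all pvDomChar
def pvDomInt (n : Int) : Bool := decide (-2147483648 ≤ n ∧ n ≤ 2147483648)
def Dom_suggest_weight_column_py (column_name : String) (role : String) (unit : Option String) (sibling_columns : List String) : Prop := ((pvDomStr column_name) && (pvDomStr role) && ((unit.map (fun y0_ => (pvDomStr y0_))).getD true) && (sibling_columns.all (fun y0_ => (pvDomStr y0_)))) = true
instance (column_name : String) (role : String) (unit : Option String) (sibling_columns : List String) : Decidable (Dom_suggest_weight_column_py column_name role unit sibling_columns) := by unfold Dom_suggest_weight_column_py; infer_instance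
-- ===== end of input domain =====

-- B replaces A's sibling-dict-then-scan-the-preference-list with a rank index over the
-- preference list plus one argmin pass over the siblings (different decomposition, comparable cost).

-- ===== PORT A =====
-- shared helper: the role-based preferred list (identical in A and in B by construction)
def pvPreferred (role : String) (lower : String) (unit : Option String) : List String :=
  if role = "price" then
    ["net_generation_mwh", "generation_mwh", "load_mwh", "energy_mwh",
     "fuel_consumed_mmbtu", "fuel_mmbtu", "quantity"]
  else if role = "rate" then
    (if PySem.Str.isIn "mmbtu" lower || unit == some "mmbtu" then
       ["fuel_consumed_mmbtu", "fuel_mmbtu"] else [])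
    ++ ["net_generation_mwh", "generation_mwh", "load_mwh", "energy_mwh", "output_mwh"]
  else if role = "ratio" then
    ["net_generation_mwh", "generation_mwh", "load_mwh", "energy_mwh",
     "customers", "customer_count"]
  else []

-- the dict comprehension {name.lower(): name for name in sibling_columns if name.lower() != lower}
def pvSibStep (lower : String) (d : PySem.Dict String String) (name : String) : PySem.Dict String String :=
  if PySem.Str.lower name ≠ lower then d.insert (PySem.Str.lower name) name else d

-- the 'for candidate in preferred: … if match: return match' loop ('if match:' is truthiness)
def pvFirstMatchA : List String → PySem.Dict String String → Option String
  | [], _ => none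
  | c :: rest, d =>
    match d.get? (PySem.Str.lower c) with
    | some m => if m = "" then pvFirstMatchA rest d else some m
    | none => pvFirstMatchA rest d

def suggest_weight_column_py (column_name : String) (role : String) (unit : Option String) (sibling_columns : List String) : Option String :=
  let lower := PySem.Str.lower column_name
  let preferred := pvPreferred role lower unit
  let lower_siblings := sibling_columns.foldl (pvSibStep lower) PySem.Dict.empty
  pvFirstMatchA preferred lower_siblings

-- ===== PORT B =====
-- rank = {cand.lower(): i for i, cand in enumerate(preferred)}
def pvRankGo : List String → Int → PySem.Dict String Int → PySem.Dict String Int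
  | [], _, rank => rank
  | c :: rest, i, rank => pvRankGo rest (i + 1) (rank.insert (PySem.Str.lower c) i)

-- one step of B's single argmin pass over sibling_columns
def pvBestStep (rank : PySem.Dict String Int) (lower : String) (best : Option (Int × String)) (name : String) : Option (Int × String) :=
  if PySem.Str.lower name == lower then best
  else
    match rank.get? (PySem.Str.lower name) with
    | none => best
    | some r =>
      match best with
      | none => some (r, name)
      | some (r0, _) => if r < r0 then some (r, name) else best

def suggest_weight_column_py_alt (column_name : String) (role : String) (unit : Option String) (sibling_columns : List String) : Option String :=
  let lower := PySem.Str.lower column_name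
  let preferred := pvPreferred role lower unit
  let rank := pvRankGo preferred 0 PySem.Dict.empty
  let best := sibling_columns.foldl (pvBestStep rank lower) none
  match best with
  | some (_, n) => some n
  | none => none

-- ===== PRECONDITION & SPEC =====
-- Pre_ excludes sibling lists containing two different spellings of the same case-insensitive
-- name: there A's dict-overwrite last-wins choice and B's first-seen argmin choice are both
-- defensible accidents of iteration order.
def Pre_suggest_weight_column_py (column_name : String) (role : String) (unit : Option String) (sibling_columns : List String) : Prop :=
  ∀ a ∈ sibling_columns, ∀ b ∈ sibling_columns, PySem.Str.lower a = PySem.Str.lower b → a = b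
instance (column_name : String) (role : String) (unit : Option String) (sibling_columns : List String) : Decidable (Pre_suggest_weight_column_py column_name role unit sibling_columns) := by unfold Pre_suggest_weight_column_py; infer_instance

def pvWitness_suggest_weight_column_py : String × String × Option String × List String :=
  ("price_usd", "price", none, ["quantity", "plant_id"])

def Spec_suggest_weight_column_py (column_name : String) (role : String) (unit : Option String) (sibling_columns : List String) (out : Option String) : Prop := out = suggest_weight_column_py_alt column_name role unit sibling_columns
instance (column_name : String) (role : String) (unit : Option String) (sibling_columns : List String) (out : Option String) : Decidable (Spec_suggest_weight_column_py column_name role unit sibling_columns out) := by unfold Spec_suggest_weight_column_py; infer_instance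

-- ===== CLAIM (what is proved, stated in full; the proofs are below) =====
def Claim_equal_suggest_weight_column_py : Prop := ∀ (column_name : String) (role : String) (unit : Option String) (sibling_columns : List String), Dom_suggest_weight_column_py column_name role unit sibling_columns → Pre_suggest_weight_column_py column_name role unit sibling_columns → Spec_suggest_weight_column_py column_name role unit sibling_columns (suggest_weight_column_py column_name role unit sibling_columns)

-- ===== LEMMAS AND PROOFS =====

-- proof-only helper: index of the first element of P whose .lower() is k
def pvFindIdx (k : String) : List String → Option Nat
  | [] => none
  | c :: rest => if PySem.Str.lower c = k then some 0 else (pvFindIdx k rest).map (· + 1)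

-- every concrete preferred list has pairwise-distinct lowercase forms, so last-wins = first-wins
lemma pvRankGo_get (P : List String) (k : String)
    (hnd : (P.map PySem.Str.lower).Nodup) : ∀ (i : Int) (d : PySem.Dict String Int),
    (pvRankGo P i d).get? k =
      (match pvFindIdx k P with
       | some j => some (i + (j : Int))
       | none => d.get? k) := by
  induction P with
  | nil => intro i d; simp [pvRankGo, pvFindIdx]
  | cons c rest ih =>
    intro i d
    simp only [List.map_cons, List.nodup_cons] at hnd
    simp only [pvRankGo, pvFindIdx]
    rw [ih hnd.2]
    by_cases hk : PySem.Str.lower c = k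
    · subst hk
      have : pvFindIdx (PySem.Str.lower c) rest = none := by
        cases t : pvFindIdx (PySem.Str.lower c) rest with
        | none => rfl
        | some j =>
          exfalso
          apply hnd.1
          clear ih hnd
          induction rest generalizing j with
          | nil => cases t
          | cons a r ihr =>
            simp only [pvFindIdx] at t
            by_cases ha : PySem.Str.lower a = PySem.Str.lower c
            · simp [ha]
            · simp only [ha, if_false, Option.map_eq_some_iff] at t
              obtain ⟨j', t', rfl⟩ := t
              simp [ihr j' t']
      simp [this, PySem.Dict.get?_insert_self]
    · have hins : (d.insert (PySem.Str.lower c) i).get? k = d.get? k :=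
        PySem.Dict.get?_insert_of_ne d i (fun h => hk h.symm)
      simp only [hk, if_false]
      cases t : pvFindIdx k rest with
      | none => simp [t, hins]
      | some j => simp [t]; push_cast; ring

lemma pvPreferred_nodup (role lower : String) (unit : Option String) :
    ((pvPreferred role lower unit).map PySem.Str.lower).Nodup := by
  unfold pvPreferred
  split_ifs <;> decide

lemma pvRank_none (role lw : String) (unit : Option String) (k : String)
    (h : pvFindIdx k (pvPreferred role lw unit) = none) :
    (pvRankGo (pvPreferred role lw unit) 0 PySem.Dict.empty).get? k = none := by
  rw [pvRankGo_get _ _ (pvPreferred_nodup role lw unit), h]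
  simp [PySem.Dict.get?_empty]

lemma pvRank_some (role lw : String) (unit : Option String) (k : String) (j : Nat)
    (h : pvFindIdx k (pvPreferred role lw unit) = some j) :
    (pvRankGo (pvPreferred role lw unit) 0 PySem.Dict.empty).get? k = some ((j : Int)) := by
  rw [pvRankGo_get _ _ (pvPreferred_nodup role lw unit), h]
  simp

lemma pvFindIdx_none {k : String} : ∀ {P : List String}, pvFindIdx k P = none →
    ∀ c ∈ P, PySem.Str.lower c ≠ k := by
  intro P
  induction P with
  | nil => intro _ c hc; cases hc
  | cons a rest ih =>
    intro h c hc
    simp only [pvFindIdx] at h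
    by_cases ha : PySem.Str.lower a = k
    · simp [ha] at h
    · simp only [ha, if_false, Option.map_eq_none_iff] at h
      rcases List.mem_cons.mp hc with rfl | hc
      · exact ha
      · exact ih h c hc

lemma pvFindIdx_some {k : String} : ∀ {P : List String} {j : Nat}, pvFindIdx k P = some j →
    (∃ c, P[j]? = some c ∧ PySem.Str.lower c = k) ∧
    (∀ i < j, ∀ c, P[i]? = some c → PySem.Str.lower c ≠ k) := by
  intro P
  induction P with
  | nil => intro j h; cases h
  | cons a rest ih =>
    intro j h
    simp only [pvFindIdx] at h
    by_cases ha : PySem.Str.lower a = k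
    · simp only [ha, if_true, Option.some_inj] at h
      subst h
      exact ⟨⟨a, by simp, ha⟩, fun i hi => by omega⟩
    · simp only [ha, if_false, Option.map_eq_some_iff] at h
      obtain ⟨j', hj', rfl⟩ := h
      obtain ⟨⟨c, hc, hck⟩, hbef⟩ := ih hj'
      refine ⟨⟨c, by simpa using hc, hck⟩, ?_⟩
      intro i hi c' hc'
      cases i with
      | zero =>
        rw [List.getElem?_cons_zero, Option.some_inj] at hc'
        subst hc'
        exact ha
      | succ i' =>
        simp only [List.getElem?_cons_succ] at hc'
        exact hbef i' (by omega) c' hc'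

-- the invariant tying A's sibling dict to B's tracked best; S is the full sibling list
def pvInv (P : List String) (lower : String) (S : List String)
    (d : PySem.Dict String String) (best : Option (Int × String)) : Prop :=
  (∀ k m, d.get? k = some m → PySem.Str.lower m = k ∧ m ∈ S) ∧
  (match best with
   | none => ∀ c ∈ P, d.get? (PySem.Str.lower c) = none
   | some (r, n) => ∃ j : Nat, r = (j : Int) ∧
       (∃ c, P[j]? = some c ∧ d.get? (PySem.Str.lower c) = some n) ∧
       (∀ i < j, ∀ c, P[i]? = some c → d.get? (PySem.Str.lower c) = none))

lemma pvInv_step (P S : List String) (lower : String) (rank : PySem.Dict String Int)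
    (hrs : ∀ k j, pvFindIdx k P = some j → rank.get? k = some ((j : Int)))
    (hrn : ∀ k, pvFindIdx k P = none → rank.get? k = none)
    (hPre : ∀ a ∈ S, ∀ b ∈ S, PySem.Str.lower a = PySem.Str.lower b → a = b)
    (d : PySem.Dict String String)
    (best : Option (Int × String)) (name : String) (hname : name ∈ S)
    (h : pvInv P lower S d best) :
    pvInv P lower S (pvSibStep lower d name) (pvBestStep rank lower best name) := by
  obtain ⟨hcoh, hbest⟩ := h
  by_cases hkl : PySem.Str.lower name = lower
  · simpa [pvSibStep, pvBestStep, hkl] using ⟨hcoh, hbest⟩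
  · have hstep : pvSibStep lower d name = d.insert (PySem.Str.lower name) name := by
      simp [pvSibStep, hkl]
    have hins : ∀ k, (d.insert (PySem.Str.lower name) name).get? k =
        if k = PySem.Str.lower name then some name else d.get? k := fun k =>
      PySem.Dict.get?_insert d (PySem.Str.lower name) k name
    have hcoh' : ∀ k m, (pvSibStep lower d name).get? k = some m →
        PySem.Str.lower m = k ∧ m ∈ S := by
      intro k m hm
      rw [hstep, hins] at hm
      split at hm
      · next heq => cases hm; exact ⟨heq ▸ rfl, hname⟩
      · exact hcoh k m hm
    rcases hfd : pvFindIdx (PySem.Str.lower name) P with _ | jr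
    · -- no candidate lowers to this key: dict gains an irrelevant key, best unchanged
      have hnk := pvFindIdx_none hfd
      have hget0 := hrn _ hfd
      refine ⟨hcoh', ?_⟩
      have hget : ∀ c ∈ P, (pvSibStep lower d name).get? (PySem.Str.lower c) = d.get? (PySem.Str.lower c) := by
        intro c hc
        rw [hstep, hins, if_neg (hnk c hc)]
      have hbs : pvBestStep rank lower best name = best := by
        simp [pvBestStep, hkl, hget0]
      rw [hbs]
      cases best with
      | none => intro c hc; rw [hget c hc]; exact hbest c hc
      | some rn =>
        obtain ⟨r0, n0⟩ := rn
        obtain ⟨j, hj, ⟨c, hc, hcv⟩, hbef⟩ := hbest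
        exact ⟨j, hj, ⟨c, hc, by rw [hget c (List.mem_of_getElem? hc)]; exact hcv⟩,
          fun i hi c' hc' => by rw [hget c' (List.mem_of_getElem? hc')]; exact hbef i hi c' hc'⟩
    · -- the key is ranked: B may update best; A's dict now answers `name` at that key
      have hgr := hrs _ _ hfd
      obtain ⟨⟨cr, hcr, hcrk⟩, hrbef⟩ := pvFindIdx_some hfd
      have hnew : (∀ i < jr, ∀ c, P[i]? = some c → d.get? (PySem.Str.lower c) = none) →
          pvInv P lower S (pvSibStep lower d name) (some ((jr : Int), name)) := by
        intro hle
        refine ⟨hcoh', jr, rfl, ⟨cr, hcr, ?_⟩, ?_⟩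
        · rw [hstep, hins, if_pos hcrk]
        · intro i hi c hc
          rw [hstep, hins, if_neg (hrbef i hi c hc)]
          exact hle i hi c hc
      cases best with
      | none =>
        have hbs : pvBestStep rank lower none name = some ((jr : Int), name) := by
          simp [pvBestStep, hkl, hgr]
        rw [hbs]
        exact hnew (fun i hi c hc => hbest c (List.mem_of_getElem? hc))
      | some rn =>
        obtain ⟨r0, n0⟩ := rn
        obtain ⟨j0, hj0, ⟨c0, hc0, hc0v⟩, hbef⟩ := hbest
        by_cases hlt : ((jr : Int)) < r0
        · have hbs : pvBestStep rank lower (some (r0, n0)) name = some ((jr : Int), name) := by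
            simp [pvBestStep, hkl, hgr, hlt]
          rw [hbs]
          refine hnew ?_
          intro i hi c hc
          have hjj : jr < j0 := by
            rw [hj0] at hlt
            exact_mod_cast hlt
          exact hbef i (by omega) c hc
        · have hbs : pvBestStep rank lower (some (r0, n0)) name = some (r0, n0) := by
            simp [pvBestStep, hkl, hgr, hlt]
          rw [hbs]
          have hj0r : j0 ≤ jr := by
            rw [hj0] at hlt
            have : ((j0 : Int)) ≤ ((jr : Int)) := le_of_not_gt hlt
            exact_mod_cast this
          refine ⟨hcoh', j0, hj0, ⟨c0, hc0, ?_⟩, ?_⟩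
          · rw [hstep, hins]
            by_cases hj0eq : j0 = jr
            · -- best sits at the very key being overwritten; Pre_ says the value is unchanged
              subst hj0eq
              have hc0cr : c0 = cr := Option.some_inj.mp (hc0.symm.trans hcr)
              have hk0 : PySem.Str.lower c0 = PySem.Str.lower name := by
                rw [hc0cr, hcrk]
              obtain ⟨hn0l, hn0S⟩ := hcoh _ _ hc0v
              have hnn : n0 = name := hPre n0 hn0S name hname (by rw [hn0l, hk0])
              rw [if_pos hk0, hnn]
            · rw [if_neg (hrbef j0 (by omega) c0 hc0)]
              exact hc0v
          · intro i hi c hc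
            rw [hstep, hins, if_neg (hrbef i (by omega) c hc)]
            exact hbef i hi c hc

lemma pvInv_foldl (P : List String) (lower : String) (rank : PySem.Dict String Int)
    (hrs : ∀ k j, pvFindIdx k P = some j → rank.get? k = some ((j : Int)))
    (hrn : ∀ k, pvFindIdx k P = none → rank.get? k = none) :
    ∀ (sibs : List String) (S : List String)
      (_ : ∀ a ∈ S, ∀ b ∈ S, PySem.Str.lower a = PySem.Str.lower b → a = b)
      (_ : ∀ x ∈ sibs, x ∈ S)
      (d : PySem.Dict String String) (best : Option (Int × String)),
      pvInv P lower S d best →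
      pvInv P lower S (sibs.foldl (pvSibStep lower) d)
        (sibs.foldl (pvBestStep rank lower) best) := by
  intro sibs
  induction sibs with
  | nil => intro S _ _ d best h; exact h
  | cons a rest ih =>
    intro S hPre hsub d best h
    exact ih S hPre (fun x hx => hsub x (by simp [hx])) _ _
      (pvInv_step P S lower rank hrs hrn hPre d best a (hsub a (by simp)) h)

lemma pvLower_empty : PySem.Str.lower "" = "" := by decide

lemma pvFirstMatchA_none (d : PySem.Dict String String) :
    ∀ P : List String, (∀ c ∈ P, d.get? (PySem.Str.lower c) = none) → pvFirstMatchA P d = none := by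
  intro P
  induction P with
  | nil => intro _; rfl
  | cons c rest ih =>
    intro h
    simp only [pvFirstMatchA, h c (by simp)]
    exact ih fun c' hc' => h c' (by simp [hc'])

lemma pvFirstMatchA_some (S : List String) (d : PySem.Dict String String)
    (hcoh : ∀ k m, d.get? k = some m → PySem.Str.lower m = k ∧ m ∈ S) :
    ∀ (P : List String) (j : Nat) (n : String),
      (∀ c ∈ P, PySem.Str.lower c ≠ "") →
      (∃ c, P[j]? = some c ∧ d.get? (PySem.Str.lower c) = some n) →
      (∀ i < j, ∀ c, P[i]? = some c → d.get? (PySem.Str.lower c) = none) →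
      pvFirstMatchA P d = some n := by
  intro P
  induction P with
  | nil =>
    intro j n _ hex _
    obtain ⟨c, hc, _⟩ := hex
    simp at hc
  | cons a rest ih =>
    intro j n hP hex hbef
    cases j with
    | zero =>
      obtain ⟨c, hc, hcv⟩ := hex
      rw [List.getElem?_cons_zero, Option.some_inj] at hc
      subst hc
      have hne : n ≠ "" := by
        intro hn
        refine hP a (by simp) ?_
        rw [← (hcoh _ _ hcv).1, hn]
        exact pvLower_empty
      simp [pvFirstMatchA, hcv, hne]
    | succ j' =>
      have ha : d.get? (PySem.Str.lower a) = none := hbef 0 (by omega) a (by simp)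
      simp only [pvFirstMatchA, ha]
      refine ih j' n (fun c hc => hP c (by simp [hc])) ?_ ?_
      · obtain ⟨c, hc, hcv⟩ := hex
        exact ⟨c, by simpa using hc, hcv⟩
      · intro i hi c hc
        exact hbef (i + 1) (by omega) c (by simpa using hc)

lemma pvInv_result (P : List String) (lower : String) (S : List String)
    (d : PySem.Dict String String)
    (best : Option (Int × String)) (hP : ∀ c ∈ P, PySem.Str.lower c ≠ "")
    (h : pvInv P lower S d best) :
    pvFirstMatchA P d = Option.map (fun p => p.2) best := by
  obtain ⟨hcoh, hbest⟩ := h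
  cases best with
  | none => simpa using pvFirstMatchA_none d P hbest
  | some rn =>
    obtain ⟨r, n⟩ := rn
    obtain ⟨j, _, hex, hbef⟩ := hbest
    simpa using pvFirstMatchA_some S d hcoh P j n hP hex hbef

lemma pvInv_empty (P : List String) (lower : String) (S : List String) :
    pvInv P lower S PySem.Dict.empty none := by
  refine ⟨?_, ?_⟩
  · intro k m hm; simp [PySem.Dict.get?_empty] at hm
  · intro c _; simp [PySem.Dict.get?_empty]

lemma pvPreferred_ne_empty (role lower : String) (unit : Option String) :
    ∀ c ∈ pvPreferred role lower unit, PySem.Str.lower c ≠ "" := by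
  unfold pvPreferred
  split_ifs <;> intro c hc <;> fin_cases hc <;> decide

-- ===== VERDICT (by name: the statement is the Claim_ definition above) =====
theorem suggest_weight_column_py_spec : Claim_equal_suggest_weight_column_py := by
  unfold Claim_equal_suggest_weight_column_py
  intro column_name role unit sibling_columns _ hPre
  unfold Spec_suggest_weight_column_py
  unfold suggest_weight_column_py suggest_weight_column_py_alt
  simp only []
  have h := pvInv_foldl (pvPreferred role (PySem.Str.lower column_name) unit)
    (PySem.Str.lower column_name)
    (pvRankGo (pvPreferred role (PySem.Str.lower column_name) unit) 0 PySem.Dict.empty)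
    (fun k j hk => pvRank_some role (PySem.Str.lower column_name) unit k j hk)
    (fun k hk => pvRank_none role (PySem.Str.lower column_name) unit k hk)
    sibling_columns sibling_columns hPre (fun x hx => hx) PySem.Dict.empty none
    (pvInv_empty _ _ _)
  have hres := pvInv_result _ _ _ _ _
    (pvPreferred_ne_empty role (PySem.Str.lower column_name) unit) h
  rw [hres]
  cases sibling_columns.foldl
      (pvBestStep (pvRankGo (pvPreferred role (PySem.Str.lower column_name) unit) 0 PySem.Dict.empty)
        (PySem.Str.lower column_name)) none with
  | none => rfl
  | some rn => obtain ⟨r, n⟩ := rn; rfl
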